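-- pv_equiv track=rewrite | github.com/LoganBolton/Spring2025Classes | social_networks/final_project/create_combined_graphs.py | get_node_token_mapping
-- ===== SOURCE A (Python) =====
-- import string
--
-- def get_node_token_mapping(tokens, num_nodes):
--     """
--     Gets the indices where each node appears in token list.
--     Assumes that nodes are in the format 'A', 'B', ..., 'Z', etc.
--     """
--     node_token_map = {i: [] for i in range(num_nodes)}
--     # Generate expected node identifiers ('A', 'B', ..., up to num_nodes)
--     node_identifiers = list(string.ascii_uppercase[:num_nodes])
--
--     for token_idx, token in enumerate(tokens):
--         cleaned_token = token.strip(':') # Example cleaning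
--
--         if cleaned_token in node_identifiers:
--             node_idx = node_identifiers.index(cleaned_token)
--             node_token_map[node_idx].append(token_idx)
--     return node_token_map
-- ===== SOURCE B (Python) =====
-- import string
--
-- def get_node_token_mapping(tokens, num_nodes):
--     """For each node index, collect the token positions where its letter occurs."""
--     cleaned = [t.strip(':') for t in tokens]
--     mapping = {i: [] for i in range(num_nodes)}
--     for i in range(min(num_nodes, 26)):
--         letter = string.ascii_uppercase[i]
--         mapping[i] = [idx for idx, tok in enumerate(cleaned) if tok == letter]
--     return mapping
-- ===== Notes on version B (the rewrite author's own statement) =====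
-- stated objective: alternative
-- what changed: Instead of A's single pass over tokens that tests membership and calls list.index on the identifier list for every token, B precomputes the stripped tokens once and builds each node's index list by a per-letter scan of the tokens; Pre_ excludes only the inputs where A raises KeyError (num_nodes < 0 with a token matching a letter of the wraparound slice uppercase[:num_nodes]).
import Mathlib
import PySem

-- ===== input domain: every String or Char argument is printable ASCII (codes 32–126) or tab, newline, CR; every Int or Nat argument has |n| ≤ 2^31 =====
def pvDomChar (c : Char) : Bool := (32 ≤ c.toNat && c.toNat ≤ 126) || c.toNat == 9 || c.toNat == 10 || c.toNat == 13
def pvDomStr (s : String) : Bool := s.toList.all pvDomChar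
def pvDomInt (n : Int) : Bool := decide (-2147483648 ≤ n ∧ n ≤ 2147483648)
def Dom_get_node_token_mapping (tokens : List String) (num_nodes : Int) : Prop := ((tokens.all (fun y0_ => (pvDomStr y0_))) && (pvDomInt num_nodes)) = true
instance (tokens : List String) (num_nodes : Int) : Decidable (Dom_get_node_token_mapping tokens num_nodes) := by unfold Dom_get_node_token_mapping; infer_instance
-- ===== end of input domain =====

-- B replaces A's single pass over tokens (membership test + list.index + dict append per token)
-- by one scan of the token list per node letter; objective: alternative decomposition, same cost class.

-- string.ascii_uppercase
def pvUpper : List Char := "ABCDEFGHIJKLMNOPQRSTUVWXYZ".toList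

-- ===== PORT A =====
def get_node_token_mapping (tokens : List String) (num_nodes : Int) : List (Int × List Int) :=
  let node_token_map : PySem.Dict Int (List Int) :=
    (PySem.List.pyRange 0 num_nodes 1).foldl (fun d i => d.insert i ([] : List Int)) PySem.Dict.empty
  let node_identifiers : List String :=
    (PySem.List.slice pvUpper none (some num_nodes)).map (fun c => String.ofList [c])
  let final :=
    (PySem.List.enumerate tokens 0).foldl (fun d p =>
      let cleaned_token := PySem.Str.stripChars p.2 ":"
      match PySem.List.index? node_identifiers cleaned_token with
      | some node_idx => d.modify ((node_idx : Int)) [] (fun l => l ++ [p.1])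
      | none => d) node_token_map
  final.items

-- ===== PORT B =====
def get_node_token_mapping_alt (tokens : List String) (num_nodes : Int) : List (Int × List Int) :=
  let cleaned : List String := tokens.map (fun t => PySem.Str.stripChars t ":")
  let mapping : PySem.Dict Int (List Int) :=
    (PySem.List.pyRange 0 num_nodes 1).foldl (fun d i => d.insert i ([] : List Int)) PySem.Dict.empty
  let final :=
    (PySem.List.pyRange 0 (min num_nodes 26) 1).foldl (fun d i =>
      -- string.ascii_uppercase[i]; 0 ≤ i < 26 here, so the default of pyGetD is never used
      let letter : String := String.ofList [PySem.List.pyGetD pvUpper i 'A']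
      d.insert i
        (((PySem.List.enumerate cleaned 0).filter (fun q => q.2 == letter)).map (fun q => q.1)))
      mapping
  final.items

-- ===== PRECONDITION & SPEC =====
-- Pre_ excludes exactly the inputs where the Python A raises KeyError: with num_nodes < 0 the
-- negative slice ascii_uppercase[:num_nodes] still names letters while the dict built from
-- range(num_nodes) is empty, so any token whose strip(':') matches such a letter raises.
def Pre_get_node_token_mapping (tokens : List String) (num_nodes : Int) : Prop :=
  0 ≤ num_nodes ∨ ∀ t ∈ tokens, PySem.Str.stripChars t ":" ∉
    (PySem.List.slice pvUpper none (some num_nodes)).map (fun c => String.ofList [c])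
instance (tokens : List String) (num_nodes : Int) : Decidable (Pre_get_node_token_mapping tokens num_nodes) := by unfold Pre_get_node_token_mapping; infer_instance
def pvWitness_get_node_token_mapping : List String × Int := (["A:", "B", "x", "A"], 3)

def Spec_get_node_token_mapping (tokens : List String) (num_nodes : Int) (out : List (Int × List Int)) : Prop := out = get_node_token_mapping_alt tokens num_nodes
instance (tokens : List String) (num_nodes : Int) (out : List (Int × List Int)) : Decidable (Spec_get_node_token_mapping tokens num_nodes out) := by unfold Spec_get_node_token_mapping; infer_instance

-- ===== CLAIM (what is proved, stated in full; the proofs are below) =====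
def Claim_equal_get_node_token_mapping : Prop := ∀ (tokens : List String) (num_nodes : Int), Dom_get_node_token_mapping tokens num_nodes → Pre_get_node_token_mapping tokens num_nodes → Spec_get_node_token_mapping tokens num_nodes (get_node_token_mapping tokens num_nodes)

-- ===== LEMMAS AND PROOFS =====

-- enumerate of a mapped list
theorem pv_enumerate_map (xs : List String) (f : String → String) (s : Int) :
    PySem.List.enumerate (xs.map f) s = (PySem.List.enumerate xs s).map (fun p => (p.1, f p.2)) := by
  induction xs generalizing s with
  | nil => simp [PySem.List.enumerate_nil]
  | cons x xs ih => simp [PySem.List.enumerate_cons, ih]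

-- A's loop leaves the dict unchanged when no token matches any identifier
theorem pv_afold_id (ids : List String) (l : List (Int × String))
    (d : PySem.Dict Int (List Int))
    (h : ∀ p ∈ l, PySem.List.index? ids (PySem.Str.stripChars p.2 ":") = none) :
    l.foldl (fun d p =>
      match PySem.List.index? ids (PySem.Str.stripChars p.2 ":") with
      | some node_idx => d.modify ((node_idx : Int)) [] (fun l => l ++ [p.1])
      | none => d) d = d := by
  induction l generalizing d with
  | nil => rfl
  | cons p l ih =>
      simp only [List.foldl_cons, h p (by simp)]
      exact ih d (fun q hq => h q (by simp [hq]))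

-- value of A's loop at each key
theorem pv_afold_getD (ids : List String) (l : List (Int × String))
    (d : PySem.Dict Int (List Int)) (v : Int) :
    (l.foldl (fun d p =>
      match PySem.List.index? ids (PySem.Str.stripChars p.2 ":") with
      | some node_idx => d.modify ((node_idx : Int)) [] (fun l => l ++ [p.1])
      | none => d) d).getD v []
    = d.getD v [] ++ (l.filter (fun p =>
        (Option.map (fun k : Nat => (k : Int)) (PySem.List.index? ids (PySem.Str.stripChars p.2 ":"))) == some v)).map (fun p => p.1) := by
  induction l generalizing d with
  | nil => simp
  | cons p l ih =>
      rw [List.foldl_cons, List.filter_cons]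
      cases h : PySem.List.index? ids (PySem.Str.stripChars p.2 ":") with
      | none =>
          simp only [Option.map_none]
          rw [if_neg (by simp)]
          exact ih d
      | some k =>
          simp only [Option.map_some]
          by_cases hv : (k : Int) = v
          · subst hv
            rw [if_pos (by simp), ih]
            rw [PySem.Dict.getD_modify_self]
            simp
          · rw [if_neg (by simp [hv]), ih]
            rw [PySem.Dict.getD_modify_of_ne _ _ _ (Ne.symm hv)]

-- A's loop preserves the key list when every modified key is present
theorem pv_afold_keys (ids : List String) (l : List (Int × String))
    (d : PySem.Dict Int (List Int))
    (h : ∀ p ∈ l, ∀ k, PySem.List.index? ids (PySem.Str.stripChars p.2 ":") = some k → ((k : Int)) ∈ d.keys) :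
    (l.foldl (fun d p =>
      match PySem.List.index? ids (PySem.Str.stripChars p.2 ":") with
      | some node_idx => d.modify ((node_idx : Int)) [] (fun l => l ++ [p.1])
      | none => d) d).keys = d.keys := by
  induction l generalizing d with
  | nil => rfl
  | cons p l ih =>
      simp only [List.foldl_cons]
      cases hidx : PySem.List.index? ids (PySem.Str.stripChars p.2 ":") with
      | none =>
          exact ih d (fun q hq k hk => h q (by simp [hq]) k hk)
      | some k =>
          have hmem : ((k : Int)) ∈ d.keys := h p (by simp) k hidx
          have hkeys : (d.modify ((k : Int)) [] (fun l => l ++ [p.1])).keys = d.keys := by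
            rw [PySem.Dict.keys_modify]
            exact PySem.Dict.keys_insert_of_contains _ _ ((PySem.Dict.contains_iff_mem_keys d _).2 hmem)
          rw [ih _ (fun q hq k' hk' => by rw [hkeys]; exact h q (by simp [hq]) k' hk'), hkeys]

-- value of an insert loop whose inserted value depends only on the key
theorem pv_bfold_getD (g : Int → List Int) (l : List Int)
    (d : PySem.Dict Int (List Int)) (v : Int) :
    (l.foldl (fun d i => d.insert i (g i)) d).getD v []
    = if v ∈ l then g v else d.getD v [] := by
  induction l generalizing d with
  | nil => simp
  | cons i l ih =>
      simp only [List.foldl_cons, ih, List.mem_cons]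
      by_cases hv : v ∈ l
      · simp [hv]
      · by_cases hvi : v = i
        · subst hvi; simp [hv]
        · simp [hv, hvi, PySem.Dict.getD_insert]

-- key list of an insert loop whose inserted value depends only on the key
theorem pv_bfold_keys (g : Int → List Int) (l : List Int) (d : PySem.Dict Int (List Int)) :
    (l.foldl (fun d i => d.insert i (g i)) d).keys = PySem.Set.update d.keys l :=
  PySem.Dict.keys_foldl_insert l (fun _ i => g i) d

theorem pv_set_update_of_mem {s : PySem.Set Int} {xs : List Int}
    (h : ∀ x ∈ xs, x ∈ s) : PySem.Set.update s xs = s := by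
  induction xs generalizing s with
  | nil => rfl
  | cons x xs ih =>
      have : PySem.Set.add s x = s := PySem.Set.add_of_mem (h x (by simp))
      show PySem.Set.update (PySem.Set.add s x) xs = s
      rw [this]
      exact ih (fun y hy => h y (by simp [hy]))

-- the initial dict {i: [] for i in range(num_nodes)}
theorem pv_init_items (n : Int) :
    ((PySem.List.pyRange 0 n 1).foldl (fun d i => d.insert i ([] : List Int)) PySem.Dict.empty).items
    = (PySem.List.pyRange 0 n 1).map (fun i => (i, ([] : List Int))) := by
  have := PySem.Dict.items_foldl_insert_fresh (PySem.List.pyRange 0 n 1)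
    (fun a => a) (fun _ => ([] : List Int)) PySem.Dict.empty
    (fun a _ => by simp) (by simpa using PySem.List.nodup_pyRange_one 0 n)
  simpa using this

theorem pv_init_keys (n : Int) :
    ((PySem.List.pyRange 0 n 1).foldl (fun d i => d.insert i ([] : List Int)) PySem.Dict.empty).keys
    = PySem.List.pyRange 0 n 1 := by
  show (((PySem.List.pyRange 0 n 1).foldl (fun d i => d.insert i ([] : List Int)) PySem.Dict.empty).items.map Prod.fst) = _
  rw [pv_init_items]
  simp [Function.comp_def]

theorem pv_init_getD (n : Int) (v : Int) :
    ((PySem.List.pyRange 0 n 1).foldl (fun d i => d.insert i ([] : List Int)) PySem.Dict.empty).getD v [] = [] := by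
  have := pv_bfold_getD (fun _ => []) (PySem.List.pyRange 0 n 1) PySem.Dict.empty v
  simpa using this

theorem pv_mk_inj : Function.Injective (fun c => String.ofList [c]) := by
  intro a b h; simpa using congrArg String.toList h

theorem pv_ids_nodup (m : Nat) :
    (((pvUpper.take m).map (fun c => String.ofList [c])).Nodup) := by
  refine List.Nodup.map pv_mk_inj ?_
  exact (List.take_sublist m pvUpper).nodup (by decide)

-- first-index characterisation on a duplicate-free list
theorem pv_index_nodup {ids : List String} (hnd : ids.Nodup) (x : String) (k : Nat) (hk : k < ids.length) :
    (PySem.List.index? ids x = some k) ↔ x = ids[k] := by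
  constructor
  · intro h
    obtain ⟨hk', hx, _⟩ := PySem.List.getElem_of_index?_eq_some h
    exact hx.symm
  · intro h
    have hmem : x ∈ ids := h ▸ List.getElem_mem hk
    obtain ⟨j, hj⟩ := Option.isSome_iff_exists.1 ((PySem.List.index?_isSome_iff ids x).2 hmem)
    obtain ⟨hj', hx, _⟩ := PySem.List.getElem_of_index?_eq_some hj
    have : j = k := (List.Nodup.getElem_inj_iff hnd (hi := hj') (hj := hk)).1 (by rw [hx, h])
    rwa [this] at hj


-- condition of A's per-token test vs B's per-letter test
theorem pv_cond_eq (ids : List String) (hnd : ids.Nodup) (x : String) (k0 : Nat)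
    (hk0 : k0 < ids.length) :
    ((Option.map (fun k : Nat => (k : Int)) (PySem.List.index? ids x)) == some ((k0 : Nat) : Int))
      = (x == ids[k0]) := by
  by_cases hx : x = ids[k0]
  · rw [(pv_index_nodup hnd x k0 hk0).2 hx]
    simp [hx]
  · cases h : PySem.List.index? ids x with
    | none => simp [hx]
    | some j =>
        have hj : j < ids.length := (PySem.List.getElem_of_index?_eq_some h).1
        have hne : j ≠ k0 := by
          intro hjk; subst hjk
          exact hx ((pv_index_nodup hnd x j hj).1 h)
        simp [hx, hne]

theorem pv_main (tokens : List String) (n : Int)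
    (hpre : Pre_get_node_token_mapping tokens n) :
    get_node_token_mapping tokens n = get_node_token_mapping_alt tokens n := by
  unfold get_node_token_mapping get_node_token_mapping_alt
  by_cases h0 : 0 ≤ n
  · obtain ⟨m, rfl⟩ : ∃ m : Nat, n = (m : Int) := ⟨n.toNat, (Int.toNat_of_nonneg h0).symm⟩
    rw [PySem.List.slice_to_natCast]
    have hmin : min ((m : Nat) : Int) 26 = ((min m 26 : Nat) : Int) := by omega
    rw [hmin]
    set ids : List String := (pvUpper.take m).map (fun c => String.ofList [c]) with hids
    have hlen : ids.length = min m 26 := by simp [hids, pvUpper]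
    have hnd : ids.Nodup := pv_ids_nodup m
    set R := PySem.List.pyRange 0 ((m : Nat) : Int) 1 with hRdef
    set init := R.foldl (fun d i => d.insert i ([] : List Int)) PySem.Dict.empty with hinit
    set l2 := PySem.List.pyRange 0 ((min m 26 : Nat) : Int) 1 with hl2
    show ((PySem.List.enumerate tokens 0).foldl (fun d p =>
        match PySem.List.index? ids (PySem.Str.stripChars p.2 ":") with
        | some node_idx => d.modify ((node_idx : Int)) [] (fun l => l ++ [p.1])
        | none => d) init).items
      = (l2.foldl (fun d i => d.insert i
          (((PySem.List.enumerate (tokens.map (fun t => PySem.Str.stripChars t ":")) 0).filter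
              (fun q => q.2 == String.ofList [PySem.List.pyGetD pvUpper i 'A'])).map (fun q => q.1))) init).items
    have hinitkeys : init.keys = R := pv_init_keys _
    have hAkeys : ((PySem.List.enumerate tokens 0).foldl (fun d p =>
        match PySem.List.index? ids (PySem.Str.stripChars p.2 ":") with
        | some node_idx => d.modify ((node_idx : Int)) [] (fun l => l ++ [p.1])
        | none => d) init).keys = R := by
      rw [pv_afold_keys]
      · exact hinitkeys
      · intro p _ k hk
        have hklt : k < ids.length := (PySem.List.getElem_of_index?_eq_some hk).1
        rw [hinitkeys, hRdef, PySem.List.mem_pyRange_one]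
        rw [hlen] at hklt
        omega
    have hBkeys : (l2.foldl (fun d i => d.insert i
          (((PySem.List.enumerate (tokens.map (fun t => PySem.Str.stripChars t ":")) 0).filter
              (fun q => q.2 == String.ofList [PySem.List.pyGetD pvUpper i 'A'])).map (fun q => q.1))) init).keys = R := by
      rw [pv_bfold_keys, hinitkeys]
      refine pv_set_update_of_mem (fun x hx => ?_)
      rw [hl2, PySem.List.mem_pyRange_one] at hx
      rw [hRdef, PySem.List.mem_pyRange_one]
      omega
    have hnodupR : R.Nodup := by rw [hRdef]; exact PySem.List.nodup_pyRange_one 0 _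
    rw [PySem.Dict.items_eq_map_keys _ (by rw [hAkeys]; exact hnodupR) ([] : List Int),
        PySem.Dict.items_eq_map_keys _ (by rw [hBkeys]; exact hnodupR) ([] : List Int),
        hAkeys, hBkeys]
    refine List.map_congr_left (fun i hiR => ?_)
    have hib : 0 ≤ i ∧ i < ((m : Nat) : Int) := by
      rw [hRdef, PySem.List.mem_pyRange_one] at hiR; exact hiR
    refine Prod.ext rfl ?_
    show _ = _
    rw [pv_afold_getD, pv_init_getD, pv_bfold_getD, pv_init_getD, List.nil_append]
    by_cases hin : i < ((min m 26 : Nat) : Int)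
    · rw [if_pos (by rw [hl2, PySem.List.mem_pyRange_one]; exact ⟨hib.1, hin⟩)]
      obtain ⟨k0, rfl⟩ : ∃ k0 : Nat, i = (k0 : Int) := ⟨i.toNat, (Int.toNat_of_nonneg hib.1).symm⟩
      have hk026 : k0 < 26 := by omega
      have hk0len : k0 < ids.length := by rw [hlen]; omega
      have hletter : String.ofList [PySem.List.pyGetD pvUpper ((k0 : Nat) : Int) 'A'] = ids[k0] := by
        rw [PySem.List.pyGetD_natCast, List.getD_eq_getElem pvUpper 'A' (by simpa [pvUpper] using hk026)]
        show _ = (List.map (fun c => String.ofList [c]) (List.take m pvUpper))[k0]'(by simp [pvUpper]; omega)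
        simp
      rw [hletter, pv_enumerate_map, List.filter_map, List.map_map]
      simp only [Function.comp_def]
      refine congrArg _ (List.filter_congr (fun p _ => ?_))
      exact pv_cond_eq ids hnd (PySem.Str.stripChars p.2 ":") k0 hk0len
    · rw [if_neg (by rw [hl2, PySem.List.mem_pyRange_one]; intro hmem; exact hin hmem.2)]
      rw [List.filter_eq_nil_iff.2 ?_, List.map_nil]
      intro p _
      cases h : PySem.List.index? ids (PySem.Str.stripChars p.2 ":") with
      | none => simp
      | some k =>
          have hklt : k < ids.length := (PySem.List.getElem_of_index?_eq_some h).1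
          rw [hlen] at hklt
          simp only [Option.map_some, beq_iff_eq, Option.some.injEq]
          intro hki
          omega
  · -- num_nodes < 0: range(num_nodes) is empty and (by Pre_) no token matches an identifier
    have hR : PySem.List.pyRange 0 n 1 = [] := PySem.List.pyRange_one_eq_nil (by omega)
    have hmin : min n 26 = n := by omega
    have hnone : ∀ p ∈ PySem.List.enumerate tokens 0,
        PySem.List.index? ((PySem.List.slice pvUpper none (some n)).map (fun c => String.ofList [c]))
          (PySem.Str.stripChars p.2 ":") = none := by
      intro p hp
      rcases (PySem.List.mem_enumerate_iff _ _ _).1 hp with ⟨k, hk, rfl⟩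
      exact (PySem.List.index?_eq_none_iff _ _).2
        ((hpre.resolve_left h0) tokens[k] (List.getElem_mem hk))
    simp only [hR, hmin, List.foldl_nil]
    rw [pv_afold_id _ _ _ hnone]

-- ===== VERDICT (by name: the statement is the Claim_ definition above) =====
theorem get_node_token_mapping_spec : Claim_equal_get_node_token_mapping := by
  intro tokens n _ hpre
  unfold Spec_get_node_token_mapping
  exact pv_main tokens n hpre
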